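-- pv_equiv track=rewrite | github.com/BigAngryDinosaur/amazonoa | get_min_total_distance/solution.py | getMinTotalDistance
-- ===== SOURCE A (Python) =====
-- import math
-- from typing import List
--
-- def getMinTotalDistance(dist_centers: List[int]) -> int:
--     dist_centers.sort()
--     mn = math.inf
--     n = len(dist_centers)
--
--     for pivot in range(1, n):
--         w1 = (pivot - 1) // 2
--         w2 = (pivot + n - 1) // 2
--         # w2 = pivot + (n-1 - pivot) // 2
--
--         dist = 0
--
--         for i in range(pivot):
--             dist += abs(dist_centers[w1] - dist_centers[i])
--
--         for i in range(pivot, n):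
--             dist += abs(dist_centers[w2] - dist_centers[i])
--
--         mn = min(mn, dist)
--
--     return int(mn)
-- ===== SOURCE B (Python) =====
-- def getMinTotalDistance(dist_centers):
--     dist_centers.sort()
--     n = len(dist_centers)
--     pref = [0]
--     total = 0
--     for x in dist_centers:
--         total += x
--         pref.append(total)
--
--     def seg(l, r):
--         # sum of |a[m] - a[i]| for i in [l, r) on the sorted list, m the lower median index
--         m = (l + r - 1) // 2
--         a = dist_centers[m]
--         return a * (m - l) - (pref[m] - pref[l]) + (pref[r] - pref[m + 1]) - a * (r - m - 1)
--
--     return min(seg(0, p) + seg(p, n) for p in range(1, n))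
-- ===== Notes on version B (the rewrite author's own statement) =====
-- stated objective: faster
-- what changed: Replaces A's per-pivot rescan of the whole array (two inner loops of absolute deviations) by a prefix-sum array over the sorted list, evaluating each pivot's two median-deviation sums in O(1) by a closed formula.
import Mathlib
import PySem

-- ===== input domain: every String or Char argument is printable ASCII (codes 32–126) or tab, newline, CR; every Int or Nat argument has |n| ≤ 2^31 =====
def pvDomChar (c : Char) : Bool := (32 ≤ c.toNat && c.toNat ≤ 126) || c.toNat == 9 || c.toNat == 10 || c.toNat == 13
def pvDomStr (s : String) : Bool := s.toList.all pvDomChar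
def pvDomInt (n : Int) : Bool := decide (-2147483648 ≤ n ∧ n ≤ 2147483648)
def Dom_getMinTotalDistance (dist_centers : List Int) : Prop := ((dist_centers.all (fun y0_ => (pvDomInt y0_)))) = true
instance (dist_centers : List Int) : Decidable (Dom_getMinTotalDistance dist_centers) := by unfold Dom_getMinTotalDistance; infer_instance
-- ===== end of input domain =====

-- B replaces A's per-pivot rescan by prefix sums over the sorted list, evaluating each
-- pivot's median-deviation cost in O(1) (O(n log n) total vs A's O(n^2)); objective: faster.
-- Equivalence is about the RETURN value only: A sorts dist_centers in place (B does too).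

-- ===== PORT A =====
def getMinTotalDistance (dist_centers : List Int) : Int :=
  let s := PySem.List.sorted dist_centers id false
  let n : Int := s.length
  let mn : Option Int := (PySem.List.pyRange 1 n 1).foldl (fun mn pivot =>
    let w1 := PySem.Int.floordiv (pivot - 1) 2
    let w2 := PySem.Int.floordiv (pivot + n - 1) 2
    let dist : Int := (PySem.List.pyRange 0 pivot 1).foldl
      (fun d i => d + |PySem.List.pyGetD s w1 0 - PySem.List.pyGetD s i 0|) 0
    let dist := (PySem.List.pyRange pivot n 1).foldl
      (fun d i => d + |PySem.List.pyGetD s w2 0 - PySem.List.pyGetD s i 0|) dist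
    some (match mn with | none => dist | some m => min m dist)) none
  mn.getD 0   -- Python raises int(math.inf) when the loop never ran; Pre_ excludes that

-- ===== PORT B =====
def getMinTotalDistance_alt (dist_centers : List Int) : Int :=
  let s := PySem.List.sorted dist_centers id false
  let n : Int := s.length
  let pref : List Int :=
    (s.foldl (fun (st : Int × List Int) x => (st.1 + x, st.2 ++ [st.1 + x]))
      ((0 : Int), [(0 : Int)])).2
  let seg : Int → Int → Int := fun l r =>
    let m := PySem.Int.floordiv (l + r - 1) 2
    let a := PySem.List.pyGetD s m 0
    a * (m - l) - (PySem.List.pyGetD pref m 0 - PySem.List.pyGetD pref l 0)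
      + (PySem.List.pyGetD pref r 0 - PySem.List.pyGetD pref (m + 1) 0) - a * (r - m - 1)
  ((PySem.List.pyRange 1 n 1).foldl (fun (mn : Option Int) p =>
      let v := seg 0 p + seg p n
      some (match mn with | none => v | some m => min m v)) none).getD 0
  -- Python's min(...) raises on an empty generator; Pre_ excludes that

-- ===== PRECONDITION & SPEC =====
-- Both programs raise on fewer than two centers (A: int(math.inf) OverflowError; B: min of empty).
def Pre_getMinTotalDistance (dist_centers : List Int) : Prop := 2 ≤ dist_centers.length
instance (dist_centers : List Int) : Decidable (Pre_getMinTotalDistance dist_centers) := by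
  unfold Pre_getMinTotalDistance; infer_instance
def pvWitness_getMinTotalDistance : List Int := [3, -1, 7, 2]

def Spec_getMinTotalDistance (dist_centers : List Int) (out : Int) : Prop := out = getMinTotalDistance_alt dist_centers
instance (dist_centers : List Int) (out : Int) : Decidable (Spec_getMinTotalDistance dist_centers out) := by unfold Spec_getMinTotalDistance; infer_instance

-- ===== CLAIM (what is proved, stated in full; the proofs are below) =====
def Claim_equal_getMinTotalDistance : Prop := ∀ (dist_centers : List Int), Dom_getMinTotalDistance dist_centers → Pre_getMinTotalDistance dist_centers → Spec_getMinTotalDistance dist_centers (getMinTotalDistance dist_centers)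

-- ===== LEMMAS AND PROOFS =====

-- prefix sums: B's fold produces exactly the list of take-sums
theorem prefFold_spec (s : List Int) : ∀ (t : Int) (acc : List Int),
    (s.foldl (fun (st : Int × List Int) x => (st.1 + x, st.2 ++ [st.1 + x])) (t, acc)).2
      = acc ++ (List.range s.length).map (fun k => t + (s.take (k + 1)).sum) := by
  induction s with
  | nil => intro t acc; simp
  | cons y ys ih =>
      intro t acc
      rw [List.foldl_cons, ih]
      simp [List.range_succ_eq_map, List.map_map, Function.comp, add_assoc]

theorem sum_map_sub_int {α : Type} (xs : List α) (f g : α → Int) :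
    (xs.map (fun x => f x - g x)).sum = (xs.map f).sum - (xs.map g).sum := by
  induction xs with
  | nil => simp
  | cons y ys ih => simp [ih]; ring

-- sum of s[i] over range l..r equals difference of take-sums
theorem sum_idx (s : List Int) : ∀ (c : Nat) (l : Int), 0 ≤ l → l + c ≤ (s.length : Int) →
    ((PySem.List.pyRange l (l + c) 1).map (fun i => PySem.List.pyGetD s i 0)).sum
      = (s.take (l + c).toNat).sum - (s.take l.toNat).sum := by
  intro c
  induction c with
  | zero => intro l h0 h1; simp [PySem.List.pyRange_one_eq_nil]
  | succ k ih =>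
      intro l h0 h1
      have hc : l + (k + 1 : Nat) = (l + k) + 1 := by push_cast; ring
      rw [hc, PySem.List.pyRange_one_succ_right (by omega), List.map_append, List.sum_append]
      have := ih l h0 (by omega)
      simp only [this, List.map_cons, List.map_nil, List.sum_cons, List.sum_nil]
      have hlt : l + (k : Int) < (s.length : Int) := by omega
      rw [PySem.List.pyGetD_eq_getElem s 0 (by omega) hlt]
      have htn : ((l + k) + 1).toNat = (l + (k:Int)).toNat + 1 := by omega
      rw [htn, List.sum_take_succ s (l + (k:Int)).toNat (by omega)]
      ring

-- monotone access on the sorted list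
theorem sorted_getD_mono (s : List Int) (hs : s.Pairwise (· ≤ ·)) {i j : Int}
    (h0 : 0 ≤ i) (hij : i ≤ j) (hj : j < (s.length : Int)) :
    PySem.List.pyGetD s i 0 ≤ PySem.List.pyGetD s j 0 := by
  rw [PySem.List.pyGetD_eq_getElem s 0 h0 (by omega),
      PySem.List.pyGetD_eq_getElem s 0 (by omega) hj]
  rcases eq_or_lt_of_le hij with h | h
  · simp [h]
  · exact (List.pairwise_iff_getElem.mp hs) i.toNat j.toNat (by omega) (by omega) (by omega)

-- sum_idx restated with endpoints
theorem sum_idx' (s : List Int) (l r : Int) (h0 : 0 ≤ l) (hlr : l ≤ r) (hr : r ≤ (s.length : Int)) :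
    ((PySem.List.pyRange l r 1).map (fun i => PySem.List.pyGetD s i 0)).sum
      = (s.take r.toNat).sum - (s.take l.toNat).sum := by
  have he : l + ((r - l).toNat : Int) = r := by omega
  have := sum_idx s (r - l).toNat l h0 (by omega)
  rw [he] at this
  exact this

-- per-pivot cost: A's scan over [l,r) around the median m equals the prefix-sum formula
theorem seg_eq (s : List Int) (hs : s.Pairwise (· ≤ ·)) (l r : Int) (c : Int)
    (h0 : 0 ≤ l) (hlr : l < r) (hr : r ≤ (s.length : Int)) :
    (PySem.List.pyRange l r 1).foldl
        (fun d i => d + |PySem.List.pyGetD s (PySem.Int.floordiv (l + r - 1) 2) 0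
                          - PySem.List.pyGetD s i 0|) c
      = c + (PySem.List.pyGetD s (PySem.Int.floordiv (l + r - 1) 2) 0) * ((PySem.Int.floordiv (l + r - 1) 2) - l)
          - ((s.take (PySem.Int.floordiv (l + r - 1) 2).toNat).sum - (s.take l.toNat).sum)
          + ((s.take r.toNat).sum - (s.take ((PySem.Int.floordiv (l + r - 1) 2) + 1).toNat).sum)
          - (PySem.List.pyGetD s (PySem.Int.floordiv (l + r - 1) 2) 0) * (r - (PySem.Int.floordiv (l + r - 1) 2) - 1) := by
  have h2 : (0 : Int) < 2 := by norm_num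
  set m := PySem.Int.floordiv (l + r - 1) 2 with hm
  have hlm : l ≤ m := by rw [hm]; exact (PySem.Int.le_floordiv_iff_mul_le h2).mpr (by omega)
  have hmr : m < r := by rw [hm]; exact (PySem.Int.floordiv_lt_iff_lt_mul h2).mpr (by omega)
  rw [PySem.List.pyRange_one_append l (m + 1) r (by omega) (by omega), List.foldl_append,
      PySem.List.foldl_add, PySem.List.foldl_add]
  have hA : ∀ i ∈ PySem.List.pyRange l (m + 1) 1,
      |PySem.List.pyGetD s m 0 - PySem.List.pyGetD s i 0|
        = (fun i => PySem.List.pyGetD s m 0 - PySem.List.pyGetD s i 0) i := by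
    intro i hi
    obtain ⟨hi1, hi2⟩ := PySem.List.mem_pyRange_one.mp hi
    exact abs_of_nonneg (sub_nonneg.mpr (sorted_getD_mono s hs (by omega) (by omega) (by omega)))
  have hB : ∀ i ∈ PySem.List.pyRange (m + 1) r 1,
      |PySem.List.pyGetD s m 0 - PySem.List.pyGetD s i 0|
        = (fun i => PySem.List.pyGetD s i 0 - PySem.List.pyGetD s m 0) i := by
    intro i hi
    obtain ⟨hi1, hi2⟩ := PySem.List.mem_pyRange_one.mp hi
    rw [abs_sub_comm]
    exact abs_of_nonneg (sub_nonneg.mpr (sorted_getD_mono s hs (by omega) (by omega) (by omega)))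
  rw [List.map_congr_left hA, List.map_congr_left hB,
      sum_map_sub_int _ (fun _ => PySem.List.pyGetD s m 0) (fun i => PySem.List.pyGetD s i 0),
      sum_map_sub_int _ (fun i => PySem.List.pyGetD s i 0) (fun _ => PySem.List.pyGetD s m 0),
      PySem.List.sum_map_const_int, PySem.List.sum_map_const_int,
      sum_idx' s l (m + 1) (by omega) (by omega) (by omega),
      sum_idx' s (m + 1) r (by omega) (by omega) (by omega),
      PySem.List.length_pyRange_one, PySem.List.length_pyRange_one]
  have hc1 : (((m + 1 - l).toNat : Int)) = m + 1 - l := by omega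
  have hc2 : (((r - (m + 1)).toNat : Int)) = r - m - 1 := by omega
  have hmn : (m + 1).toNat = m.toNat + 1 := by omega
  have ha : PySem.List.pyGetD s m 0 = s[m.toNat] :=
    PySem.List.pyGetD_eq_getElem s 0 (by omega) (by omega)
  have hT : (s.take (m + 1).toNat).sum = (s.take m.toNat).sum + s[m.toNat] := by
    rw [hmn, List.sum_take_succ s m.toNat (by omega)]
  rw [hc1, hc2, hT, ha]
  ring

-- B's prefix list indexed: pyGetD on the built list is a take-sum
theorem pref_getD (s : List Int) (k : Int) (h0 : 0 ≤ k) (h1 : k ≤ (s.length : Int)) :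
    PySem.List.pyGetD ([(0 : Int)] ++ (List.range s.length).map (fun j => 0 + (s.take (j + 1)).sum)) k 0
      = (s.take k.toNat).sum := by
  have hlen : ([(0 : Int)] ++ (List.range s.length).map (fun j => 0 + (s.take (j + 1)).sum)).length
      = s.length + 1 := by simp
  rw [PySem.List.pyGetD_eq_getElem _ 0 h0 (by rw [hlen]; push_cast; omega)]
  rcases Nat.eq_zero_or_pos k.toNat with hk | hk
  · simp [hk]
  · obtain ⟨j, hj⟩ : ∃ j, k.toNat = j + 1 := ⟨k.toNat - 1, by omega⟩
    have hjlt : j < s.length := by omega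
    simp [hj, hjlt]

def prefOf (s : List Int) : List Int :=
  (s.foldl (fun (st : Int × List Int) x => (st.1 + x, st.2 ++ [st.1 + x]))
    ((0 : Int), [(0 : Int)])).2

-- the whole per-pivot cost: A's two scans equal B's seg 0 p + seg p n
theorem cost_eq (s : List Int) (hs : s.Pairwise (· ≤ ·)) (p : Int)
    (hp1 : 1 ≤ p) (hp2 : p < (s.length : Int)) :
    (PySem.List.pyRange p (s.length : Int) 1).foldl
        (fun d i => d + |PySem.List.pyGetD s (PySem.Int.floordiv (p + (s.length : Int) - 1) 2) 0
                          - PySem.List.pyGetD s i 0|)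
        ((PySem.List.pyRange 0 p 1).foldl
          (fun d i => d + |PySem.List.pyGetD s (PySem.Int.floordiv (p - 1) 2) 0
                            - PySem.List.pyGetD s i 0|) 0)
      = (PySem.List.pyGetD s (PySem.Int.floordiv (0 + p - 1) 2) 0 * (PySem.Int.floordiv (0 + p - 1) 2 - 0)
          - (PySem.List.pyGetD (prefOf s) (PySem.Int.floordiv (0 + p - 1) 2) 0 - PySem.List.pyGetD (prefOf s) 0 0)
          + (PySem.List.pyGetD (prefOf s) p 0 - PySem.List.pyGetD (prefOf s) (PySem.Int.floordiv (0 + p - 1) 2 + 1) 0)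
          - PySem.List.pyGetD s (PySem.Int.floordiv (0 + p - 1) 2) 0 * (p - PySem.Int.floordiv (0 + p - 1) 2 - 1))
        + (PySem.List.pyGetD s (PySem.Int.floordiv (p + (s.length : Int) - 1) 2) 0 * (PySem.Int.floordiv (p + (s.length : Int) - 1) 2 - p)
          - (PySem.List.pyGetD (prefOf s) (PySem.Int.floordiv (p + (s.length : Int) - 1) 2) 0 - PySem.List.pyGetD (prefOf s) p 0)
          + (PySem.List.pyGetD (prefOf s) (s.length : Int) 0 - PySem.List.pyGetD (prefOf s) (PySem.Int.floordiv (p + (s.length : Int) - 1) 2 + 1) 0)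
          - PySem.List.pyGetD s (PySem.Int.floordiv (p + (s.length : Int) - 1) 2) 0 * ((s.length : Int) - PySem.Int.floordiv (p + (s.length : Int) - 1) 2 - 1)) := by
  have h0p : (0 : Int) + p - 1 = p - 1 := by ring
  rw [h0p]
  have hP : prefOf s = [(0 : Int)] ++ (List.range s.length).map (fun j => 0 + (s.take (j + 1)).sum) := by
    unfold prefOf; exact prefFold_spec s 0 [0]
  have hm1 : (0 : Int) ≤ PySem.Int.floordiv (p - 1) 2 :=
    (PySem.Int.le_floordiv_iff_mul_le (by norm_num)).mpr (by omega)
  have hm1' : PySem.Int.floordiv (p - 1) 2 < p :=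
    (PySem.Int.floordiv_lt_iff_lt_mul (by norm_num)).mpr (by omega)
  have hm2 : p ≤ PySem.Int.floordiv (p + (s.length : Int) - 1) 2 :=
    (PySem.Int.le_floordiv_iff_mul_le (by norm_num)).mpr (by omega)
  have hm2' : PySem.Int.floordiv (p + (s.length : Int) - 1) 2 < (s.length : Int) :=
    (PySem.Int.floordiv_lt_iff_lt_mul (by norm_num)).mpr (by omega)
  rw [hP,
      pref_getD s _ hm1 (by omega), pref_getD s 0 le_rfl (by omega),
      pref_getD s p (by omega) (by omega), pref_getD s _ (by omega) (by omega),
      pref_getD s _ (by omega) (by omega), pref_getD s (s.length : Int) (by omega) le_rfl,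
      pref_getD s _ (by omega) (by omega)]
  have e1 := seg_eq s hs 0 p 0 le_rfl (by omega) (by omega)
  rw [h0p] at e1
  have e2 := seg_eq s hs p (s.length : Int)
      ((PySem.List.pyRange 0 p 1).foldl
        (fun d i => d + |PySem.List.pyGetD s (PySem.Int.floordiv (p - 1) 2) 0
                          - PySem.List.pyGetD s i 0|) 0) (by omega) (by omega) le_rfl
  rw [e2, e1]
  ring

-- ===== VERDICT (by name: the statement is the Claim_ definition above) =====
theorem getMinTotalDistance_spec : Claim_equal_getMinTotalDistance := by
  intro dc _ hpre
  unfold Spec_getMinTotalDistance getMinTotalDistance getMinTotalDistance_alt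
  have hs : (PySem.List.sorted dc id false).Pairwise (· ≤ ·) := by
    simpa using PySem.List.sorted_pairwise dc id
  set s := PySem.List.sorted dc id false with hsdef
  have hlen : s.length = dc.length := by
    rw [hsdef]; exact PySem.List.length_sorted dc id false
  have hn2 : 2 ≤ s.length := by rw [hlen]; exact hpre
  dsimp only
  congr 1
  apply PySem.List.foldl_congr_mem
  intro acc p hp
  obtain ⟨hp1, hp2⟩ := PySem.List.mem_pyRange_one.mp hp
  have hc := cost_eq s hs p hp1 hp2
  cases acc with
  | none => exact congrArg some hc
  | some m => exact congrArg some (congrArg (min m) hc)
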